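-- pv_equiv track=rewrite | github.com/ninepig/leecode_dd_2024 | zAmazon/oa/zmethodExplained/maxbookCopy.py | maximumBookCopies
-- ===== SOURCE A (Python) =====
-- from collections import Counter
-- from typing import List
--
-- def maximumBookCopies(portalUpdate: List[int]) -> List[int]:
--     updateDict = Counter()
--     result = []
--
--     for bookId in portalUpdate:
--         if bookId > 0:
--             updateDict[bookId] += 1
--         else:
--             updateDict[-bookId] -= 1
--         result.append(max(updateDict.values()))
--
--     return result
-- ===== SOURCE B (Python) =====
-- def maximumBookCopies(portalUpdate):
--     counts = {}
--     freq = {}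
--     cur = 0  # meaningful only once counts is nonempty
--     result = []
--     for bookId in portalUpdate:
--         if bookId > 0:
--             key, delta = bookId, 1
--         else:
--             key, delta = -bookId, -1
--         if key in counts:
--             old = counts[key]
--             new = old + delta
--             counts[key] = new
--             freq[old] -= 1
--             freq[new] = freq.get(new, 0) + 1
--             if delta == 1:
--                 if new > cur:
--                     cur = new
--             elif old == cur and freq[old] == 0:
--                 cur = new
--         else:
--             new = delta
--             cur = new if not counts else max(cur, new)
--             counts[key] = new
--             freq[new] = freq.get(new, 0) + 1
--         result.append(cur)
--     return result
-- ===== Notes on version B (the rewrite author's own statement) =====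
-- stated objective: faster
-- what changed: A rescans every counter value with max() after each update (O(n*k) for k distinct ids); B keeps a count-frequency table and a running maximum that it updates in O(1) per +-1 operation, one pass total.
import Mathlib
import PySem

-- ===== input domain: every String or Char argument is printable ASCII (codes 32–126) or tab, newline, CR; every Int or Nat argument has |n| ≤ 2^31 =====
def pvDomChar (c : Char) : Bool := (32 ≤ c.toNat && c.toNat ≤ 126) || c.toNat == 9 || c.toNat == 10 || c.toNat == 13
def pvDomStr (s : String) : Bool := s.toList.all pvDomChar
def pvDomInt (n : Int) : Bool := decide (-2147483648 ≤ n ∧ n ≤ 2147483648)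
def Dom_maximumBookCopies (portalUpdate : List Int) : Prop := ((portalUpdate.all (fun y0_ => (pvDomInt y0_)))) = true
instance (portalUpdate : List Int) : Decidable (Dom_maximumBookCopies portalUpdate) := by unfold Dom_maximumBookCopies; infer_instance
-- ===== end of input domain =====

-- B replaces A's per-step scan over all counter values by an incrementally maintained
-- count-frequency table and running maximum (objective: faster).

-- ===== PORT A =====
-- one loop step of A: Counter update, then max(updateDict.values())
def maximumBookCopies_stepA (st : PySem.Dict Int Int × List Int) (bookId : Int) :
    PySem.Dict Int Int × List Int :=
  let d := if bookId > 0 then st.1.modify bookId 0 (· + 1) else st.1.modify (-bookId) 0 (· - 1)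
  let m := match PySem.List.max? d.values (fun v => v) with
           | some m => m
           | none => 0   -- unreachable: d contains the just-updated key, so values is nonempty
  (d, st.2 ++ [m])

def maximumBookCopies (portalUpdate : List Int) : List Int :=
  (portalUpdate.foldl maximumBookCopies_stepA (PySem.Dict.empty, [])).2

-- ===== PORT B =====
-- one loop step of B: update counts, the count-frequency table freq, and the running max cur
def maximumBookCopies_stepB
    (st : PySem.Dict Int Int × PySem.Dict Int Int × Int × List Int) (bookId : Int) :
    PySem.Dict Int Int × PySem.Dict Int Int × Int × List Int :=
  let counts := st.1
  let freq := st.2.1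
  let cur := st.2.2.1
  let res := st.2.2.2
  let key := if bookId > 0 then bookId else -bookId
  let delta : Int := if bookId > 0 then 1 else -1
  if counts.contains key then
    let old := counts.getD key 0
    let nw := old + delta
    let counts' := counts.insert key nw
    let freq' := freq.insert old (freq.getD old 0 - 1)
    let freq'' := freq'.insert nw (freq'.getD nw 0 + 1)
    let cur' := if delta = 1 then (if nw > cur then nw else cur)
                else (if old = cur ∧ freq''.getD old 0 = 0 then nw else cur)
    (counts', freq'', cur', res ++ [cur'])
  else
    let nw := delta
    let cur' := if counts.size = 0 then nw else max cur nw
    (counts.insert key nw, freq.insert nw (freq.getD nw 0 + 1), cur', res ++ [cur'])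

def maximumBookCopies_alt (portalUpdate : List Int) : List Int :=
  (portalUpdate.foldl maximumBookCopies_stepB (PySem.Dict.empty, PySem.Dict.empty, 0, [])).2.2.2

-- ===== PRECONDITION & SPEC =====
def Spec_maximumBookCopies (portalUpdate : List Int) (out : List Int) : Prop := out = maximumBookCopies_alt portalUpdate
instance (portalUpdate : List Int) (out : List Int) : Decidable (Spec_maximumBookCopies portalUpdate out) := by unfold Spec_maximumBookCopies; infer_instance

-- ===== CLAIM (what is proved, stated in full; the proofs are below) =====
def Claim_equal_maximumBookCopies : Prop := ∀ (portalUpdate : List Int), Dom_maximumBookCopies portalUpdate → Spec_maximumBookCopies portalUpdate (maximumBookCopies portalUpdate)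

-- ===== LEMMAS AND PROOFS =====

-- Invariant tying B's auxiliary state to the shared counter dictionary d:
-- keys are unique, freq is the count-frequency table of d.values, and
-- (once d is nonempty) cur is the maximum of d.values.
def pvInv (d f : PySem.Dict Int Int) (cur : Int) : Prop :=
  d.keys.Nodup ∧
  (∀ c : Int, f.getD c 0 = (d.values.count c : Int)) ∧
  (d.items = [] ∨ (cur ∈ d.values ∧ ∀ v ∈ d.values, v ≤ cur))

-- Counter.__setitem__ is an insert of the modified looked-up value
lemma pvModifyEq (d : PySem.Dict Int Int) (k : Int) (f : Int → Int) :
    d.modify k 0 f = d.insert k (f (d.getD k 0)) := rfl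

-- a pointwise overwrite map that touches no key of l is the identity
lemma pvMapKeepOfNe (k v : Int) (l : List (Int × Int)) (h : ∀ q ∈ l, q.1 ≠ k) :
    l.map (fun p => if p.1 == k then (k, v) else p) = l := by
  induction l with
  | nil => rfl
  | cons p t ih =>
      simp only [List.map_cons]
      rw [if_neg (by simpa using h p (by simp)), ih (fun q hq => h q (by simp [hq]))]

-- value-multiset effect of overwriting the unique entry for key k (value c -> v), counted at w
lemma pvCountUpdate (k c v w : Int) (l : List (Int × Int))
    (hn : (l.map Prod.fst).Nodup) (hm : (k, c) ∈ l) :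
    ((l.map (fun p => if p.1 == k then (k, v) else p)).map Prod.snd).count w
      + (if c = w then 1 else 0)
    = (l.map Prod.snd).count w + (if v = w then 1 else 0) := by
  induction l with
  | nil => simp at hm
  | cons p t ih =>
      simp only [List.map_cons, List.nodup_cons] at hn
      rcases List.mem_cons.1 hm with h1 | h2
      · subst h1
        have ht : List.map (fun p => if p.1 == k then (k, v) else p) t = t :=
          pvMapKeepOfNe k v t (fun q hq hqk => hn.1 (List.mem_map.2 ⟨q, hq, hqk⟩))
        simp only [List.map_cons, ht, List.count_cons]
        by_cases hv : v = w <;> by_cases hc : c = w <;>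
          simp [hv, hc]
      · have hpk : ¬ (p.1 == k) = true := by
          simp only [beq_iff_eq]
          intro he
          exact hn.1 (List.mem_map.2 ⟨(k, c), h2, by simp [he]⟩)
        simp only [List.map_cons, if_neg hpk, List.count_cons]
        have := ih hn.2 h2
        omega

-- dict-level versions
lemma pvCountValuesInsertContains (d : PySem.Dict Int Int) (k c v w : Int)
    (hn : d.keys.Nodup) (hc : d.get? k = some c) :
    ((d.insert k v).values.count w) + (if c = w then 1 else 0)
      = d.values.count w + (if v = w then 1 else 0) := by
  have hcontains : d.contains k = true := by
    rw [PySem.Dict.contains_eq_isSome_get?, hc]; rfl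
  have hitems : (d.insert k v).items = d.items.map (fun p => if p.1 == k then (k, v) else p) :=
    PySem.Dict.items_insert_of_contains d v hcontains
  show ((d.insert k v).items.map Prod.snd).count w + _ = (d.items.map Prod.snd).count w + _
  rw [hitems]
  exact pvCountUpdate k c v w d.items hn (PySem.Dict.mem_items_of_get?_eq_some d hc)

lemma pvValuesInsertFresh (d : PySem.Dict Int Int) (k v : Int)
    (hc : d.contains k = false) : (d.insert k v).values = d.values ++ [v] := by
  show ((d.insert k v).items.map Prod.snd) = (d.items.map Prod.snd) ++ [v]
  rw [PySem.Dict.items_insert_of_not_contains d v hc]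
  simp

lemma pvMemValuesInsertSelf (d : PySem.Dict Int Int) (k v : Int) :
    v ∈ (d.insert k v).values := by
  show v ∈ (d.insert k v).items.map Prod.snd
  exact List.mem_map.2 ⟨(k, v), PySem.Dict.mem_items_insert_self d k v, rfl⟩

lemma pvMemValuesOfGet (d : PySem.Dict Int Int) (k c : Int) (hc : d.get? k = some c) :
    c ∈ d.values := by
  show c ∈ d.items.map Prod.snd
  exact List.mem_map.2 ⟨(k, c), PySem.Dict.mem_items_of_get?_eq_some d hc, rfl⟩

-- Python's max over Int values is the unique upper-bound element
lemma pvMaxEq (V : List Int) (M : Int) (hmem : M ∈ V) (hub : ∀ v ∈ V, v ≤ M) :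
    PySem.List.max? V (fun v => v) = some M := by
  cases hV : PySem.List.max? V (fun v => v) with
  | none =>
      rw [PySem.List.max?_eq_none_iff] at hV
      simp [hV] at hmem
  | some m =>
      have h1 : m ≤ M := hub m (PySem.List.max?_mem hV)
      have h2 : M ≤ m := PySem.List.max?_isMax hV M hmem
      rw [le_antisymm h1 h2]

-- B's update of freq and cur preserves the invariant when key is already present,
-- and cur' is the maximum of the updated values
lemma pvCoreContains (d f : PySem.Dict Int Int) (cur key delta old nw : Int)
    (hdelta : delta = 1 ∨ delta = -1)
    (hget : d.get? key = some old)
    (hnw : nw = old + delta)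
    (hnd : d.keys.Nodup)
    (hfreq : ∀ c : Int, f.getD c 0 = (d.values.count c : Int))
    (hcur : cur ∈ d.values) (hub : ∀ v ∈ d.values, v ≤ cur) :
    (d.insert key nw).keys.Nodup ∧
    (∀ c : Int,
      ((f.insert old (f.getD old 0 - 1)).insert nw
        ((f.insert old (f.getD old 0 - 1)).getD nw 0 + 1)).getD c 0
        = ((d.insert key nw).values.count c : Int)) ∧
    ((if delta = 1 then (if nw > cur then nw else cur)
      else (if old = cur ∧ ((f.insert old (f.getD old 0 - 1)).insert nw
        ((f.insert old (f.getD old 0 - 1)).getD nw 0 + 1)).getD old 0 = 0 then nw else cur))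
        ∈ (d.insert key nw).values) ∧
    (∀ v ∈ (d.insert key nw).values,
      v ≤ (if delta = 1 then (if nw > cur then nw else cur)
      else (if old = cur ∧ ((f.insert old (f.getD old 0 - 1)).insert nw
        ((f.insert old (f.getD old 0 - 1)).getD nw 0 + 1)).getD old 0 = 0 then nw else cur))) := by
  have hne : nw ≠ old := by rcases hdelta with h | h <;> omega
  have hcnt : ∀ w : Int, ((d.insert key nw).values.count w) + (if old = w then 1 else 0)
      = d.values.count w + (if nw = w then 1 else 0) :=
    fun w => pvCountValuesInsertContains d key old nw w hnd hget
  have hfreq'' : ∀ c : Int,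
      ((f.insert old (f.getD old 0 - 1)).insert nw
        ((f.insert old (f.getD old 0 - 1)).getD nw 0 + 1)).getD c 0
        = ((d.insert key nw).values.count c : Int) := by
    intro cc
    rw [PySem.Dict.getD_insert]
    by_cases h2 : cc = nw
    · subst h2
      rw [if_pos rfl, PySem.Dict.getD_insert, if_neg hne, hfreq]
      have h1 := hcnt cc
      rw [if_neg (fun hh => hne hh.symm), if_pos rfl] at h1
      omega
    · rw [if_neg h2, PySem.Dict.getD_insert]
      by_cases h3 : cc = old
      · subst h3
        rw [if_pos rfl, hfreq]
        have h1 := hcnt cc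
        rw [if_pos rfl, if_neg hne] at h1
        omega
      · rw [if_neg h3, hfreq]
        have h1 := hcnt cc
        rw [if_neg (fun hh : old = cc => h3 hh.symm),
            if_neg (fun hh : nw = cc => h2 hh.symm)] at h1
        omega
  have holdmem : old ∈ d.values := pvMemValuesOfGet d key old hget
  have hnwmem : nw ∈ (d.insert key nw).values := pvMemValuesInsertSelf d key nw
  have hmem' : ∀ w : Int, w ∈ (d.insert key nw).values → w = nw ∨ w ∈ d.values :=
    fun w => PySem.Dict.mem_values_insert d key nw w
  have holdcur : old ≤ cur := hub old holdmem
  refine ⟨PySem.Dict.nodup_keys_insert d key nw hnd, hfreq'', ?_, ?_⟩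
  · -- membership of cur'
    subst hnw
    rcases hdelta with rfl | rfl
    · rw [if_pos rfl]
      by_cases hgt : old + 1 > cur
      · rw [if_pos hgt]; exact hnwmem
      · rw [if_neg hgt]
        have hcpos : 0 < d.values.count cur := List.count_pos_iff.2 hcur
        refine List.count_pos_iff.1 ?_
        have h1 := hcnt cur
        rw [if_neg (by omega : ¬ old = cur)] at h1
        by_cases hnc : old + 1 = cur
        · rw [if_pos hnc] at h1; omega
        · rw [if_neg hnc] at h1; omega
    · rw [if_neg (by norm_num : ¬ (-1 : Int) = 1)]
      simp only [hfreq'' old]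
      by_cases hcond : old = cur ∧ (((d.insert key (old + -1)).values.count old : Int) = 0)
      · rw [if_pos hcond]; exact hnwmem
      · rw [if_neg hcond]
        refine List.count_pos_iff.1 ?_
        have h1 := hcnt cur
        have hcpos : 0 < d.values.count cur := List.count_pos_iff.2 hcur
        by_cases hoc : old = cur
        · have hnz : ¬ (((d.insert key (old + -1)).values.count old : Int) = 0) :=
            fun hz => hcond ⟨hoc, hz⟩
          subst hoc
          omega
        · rw [if_neg hoc] at h1
          by_cases hnc : old + -1 = cur
          · rw [if_pos hnc] at h1; omega
          · rw [if_neg hnc] at h1; omega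
  · -- upper bound
    intro v hv
    subst hnw
    rcases hdelta with rfl | rfl
    · rw [if_pos rfl]
      by_cases hgt : old + 1 > cur
      · rw [if_pos hgt]
        rcases hmem' v hv with hveq | hvd
        · omega
        · have := hub v hvd; omega
      · rw [if_neg hgt]
        rcases hmem' v hv with hveq | hvd
        · omega
        · exact hub v hvd
    · rw [if_neg (by norm_num : ¬ (-1 : Int) = 1)]
      simp only [hfreq'' old]
      by_cases hcond : old = cur ∧ (((d.insert key (old + -1)).values.count old : Int) = 0)
      · rw [if_pos hcond]
        obtain ⟨hoc, hz⟩ := hcond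
        rcases hmem' v hv with hveq | hvd
        · omega
        · have hvc := hub v hvd
          have hvpos : 0 < (d.insert key (old + -1)).values.count v :=
            List.count_pos_iff.2 hv
          have hvo : v ≠ old := by intro hh; rw [hh] at hvpos; omega
          omega
      · rw [if_neg hcond]
        rcases hmem' v hv with hveq | hvd
        · omega
        · exact hub v hvd

-- fresh-key case: values gain one element nw
lemma pvCoreFresh (d f : PySem.Dict Int Int) (cur key nw : Int)
    (hcont : d.contains key = false)
    (hnd : d.keys.Nodup)
    (hfreq : ∀ c : Int, f.getD c 0 = (d.values.count c : Int))
    (hmax : d.items = [] ∨ (cur ∈ d.values ∧ ∀ v ∈ d.values, v ≤ cur)) :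
    (d.insert key nw).keys.Nodup ∧
    (∀ c : Int, (f.insert nw (f.getD nw 0 + 1)).getD c 0
        = ((d.insert key nw).values.count c : Int)) ∧
    ((if d.size = 0 then nw else max cur nw) ∈ (d.insert key nw).values) ∧
    (∀ v ∈ (d.insert key nw).values, v ≤ (if d.size = 0 then nw else max cur nw)) := by
  have hvals : (d.insert key nw).values = d.values ++ [nw] := pvValuesInsertFresh d key nw hcont
  have hfreq' : ∀ c : Int, (f.insert nw (f.getD nw 0 + 1)).getD c 0
      = ((d.insert key nw).values.count c : Int) := by
    intro cc
    rw [PySem.Dict.getD_insert, hvals, List.count_append]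
    by_cases h2 : cc = nw
    · subst h2
      rw [if_pos rfl, hfreq]
      simp only [List.count_cons, List.count_nil, beq_self_eq_true, if_true]
      push_cast
      omega
    · rw [if_neg h2, hfreq]
      have hz : List.count cc [nw] = 0 := by
        have hne : nw ≠ cc := fun hh => h2 hh.symm
        simp [hne]
      rw [hz]
      push_cast
      omega
  refine ⟨PySem.Dict.nodup_keys_insert d key nw hnd, hfreq', ?_, ?_⟩
  · by_cases hsz : d.size = 0
    · simp [hsz, hvals]
    · rw [if_neg hsz]
      have hitems : d.items ≠ [] := by
        intro hi
        exact hsz (by simp [PySem.Dict.size, hi])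
      rcases hmax with h | ⟨hcm, _⟩
      · exact absurd h hitems
      · rw [hvals]
        rcases max_choice cur nw with h | h <;> rw [h]
        · exact List.mem_append_left _ hcm
        · simp
  · intro v hv
    rw [hvals] at hv
    by_cases hsz : d.size = 0
    · rw [if_pos hsz]
      have hitems : d.items = [] := by
        cases d with | mk l => cases l <;> simp_all [PySem.Dict.size]
      have hvnil : d.values = [] := by
        show d.items.map Prod.snd = []
        rw [hitems]; rfl
      rw [hvnil] at hv
      simp at hv
      omega
    · rw [if_neg hsz]
      have hitems : d.items ≠ [] := fun hi => hsz (by simp [PySem.Dict.size, hi])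
      rcases hmax with h | ⟨_, hub⟩
      · exact absurd h hitems
      · rcases List.mem_append.1 hv with h | h
        · exact le_trans (hub v h) (le_max_left _ _)
        · simp at h
          omega

-- the per-step correspondence: both steps produce the same dict, B's invariant is
-- preserved, and both append the same value
lemma pvStep (d f : PySem.Dict Int Int) (cur : Int) (resA resB : List Int) (bookId : Int)
    (h : pvInv d f cur) :
    (maximumBookCopies_stepA (d, resA) bookId).1 = (maximumBookCopies_stepB (d, f, cur, resB) bookId).1 ∧
    pvInv (maximumBookCopies_stepB (d, f, cur, resB) bookId).1
          (maximumBookCopies_stepB (d, f, cur, resB) bookId).2.1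
          (maximumBookCopies_stepB (d, f, cur, resB) bookId).2.2.1 ∧
    (maximumBookCopies_stepA (d, resA) bookId).2
      = resA ++ [(maximumBookCopies_stepB (d, f, cur, resB) bookId).2.2.1] ∧
    (maximumBookCopies_stepB (d, f, cur, resB) bookId).2.2.2
      = resB ++ [(maximumBookCopies_stepB (d, f, cur, resB) bookId).2.2.1] := by
  obtain ⟨hnd, hfreq, hmax⟩ := h
  by_cases hpos : bookId > 0
  · by_cases hcont : d.contains bookId = true
    · cases hg : d.get? bookId with
      | none =>
          rw [PySem.Dict.contains_eq_isSome_get?, hg] at hcont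
          simp at hcont
      | some c =>
          have hold : d.getD bookId 0 = c := PySem.Dict.getD_of_get?_eq_some d 0 hg
          have hitems : d.items ≠ [] :=
            List.ne_nil_of_mem (PySem.Dict.mem_items_of_get?_eq_some d hg)
          rcases hmax with h0 | ⟨hcur, hub⟩
          · exact absurd h0 hitems
          obtain ⟨hnd', hfreq', hmem', hub'⟩ :=
            pvCoreContains d f cur bookId 1 c (c + 1) (Or.inl rfl) hg rfl hnd hfreq hcur hub
          simp only [if_true] at hmem' hub'
          have hmx := pvMaxEq _ _ hmem' hub'
          unfold pvInv
          simp only [maximumBookCopies_stepA, maximumBookCopies_stepB, pvModifyEq,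
            if_pos hpos, hcont, if_true, hold]
          refine ⟨by trivial, ⟨hnd', hfreq', Or.inr ⟨hmem', hub'⟩⟩, ?_, by trivial⟩
          rw [hmx]
    · have hcf : d.contains bookId = false := by
        simpa using hcont
      have hgd : d.getD bookId 0 = 0 := PySem.Dict.getD_of_not_contains d 0 hcf
      obtain ⟨hnd', hfreq', hmem', hub'⟩ :=
        pvCoreFresh d f cur bookId 1 hcf hnd hfreq hmax
      have hmx := pvMaxEq _ _ hmem' hub'
      unfold pvInv
      simp only [maximumBookCopies_stepA, maximumBookCopies_stepB, pvModifyEq,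
        if_pos hpos, hcf, Bool.false_eq_true, if_false, hgd, zero_add]
      refine ⟨by trivial, ⟨hnd', hfreq', Or.inr ⟨hmem', hub'⟩⟩, ?_, by trivial⟩
      rw [hmx]
  · by_cases hcont : d.contains (-bookId) = true
    · cases hg : d.get? (-bookId) with
      | none =>
          rw [PySem.Dict.contains_eq_isSome_get?, hg] at hcont
          simp at hcont
      | some c =>
          have hold : d.getD (-bookId) 0 = c := PySem.Dict.getD_of_get?_eq_some d 0 hg
          have hitems : d.items ≠ [] :=
            List.ne_nil_of_mem (PySem.Dict.mem_items_of_get?_eq_some d hg)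
          rcases hmax with h0 | ⟨hcur, hub⟩
          · exact absurd h0 hitems
          obtain ⟨hnd', hfreq', hmem', hub'⟩ :=
            pvCoreContains d f cur (-bookId) (-1) c (c + -1) (Or.inr rfl) hg rfl hnd hfreq hcur hub
          have hmx := pvMaxEq _ _ hmem' hub'
          unfold pvInv
          simp only [maximumBookCopies_stepA, maximumBookCopies_stepB, pvModifyEq,
            if_neg hpos, hcont, if_true, hold]
          rw [show (c : Int) - 1 = c + -1 from by ring]
          refine ⟨by trivial, ⟨hnd', hfreq', Or.inr ⟨hmem', hub'⟩⟩, ?_, by trivial⟩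
          rw [hmx]
    · have hcf : d.contains (-bookId) = false := by
        simpa using hcont
      have hgd : d.getD (-bookId) 0 = 0 := PySem.Dict.getD_of_not_contains d 0 hcf
      obtain ⟨hnd', hfreq', hmem', hub'⟩ :=
        pvCoreFresh d f cur (-bookId) (-1) hcf hnd hfreq hmax
      have hmx := pvMaxEq _ _ hmem' hub'
      unfold pvInv
      simp only [maximumBookCopies_stepA, maximumBookCopies_stepB, pvModifyEq,
        if_neg hpos, hcf, Bool.false_eq_true, if_false, hgd]
      rw [show (0 : Int) - 1 = -1 from by decide]
      refine ⟨by trivial, ⟨hnd', hfreq', Or.inr ⟨hmem', hub'⟩⟩, ?_, by trivial⟩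
      rw [hmx]

lemma pvFoldl (l : List Int) (d f : PySem.Dict Int Int) (cur : Int) (res : List Int)
    (h : pvInv d f cur) :
    (l.foldl maximumBookCopies_stepA (d, res)).2
      = (l.foldl maximumBookCopies_stepB (d, f, cur, res)).2.2.2 := by
  induction l generalizing d f cur res with
  | nil => rfl
  | cons b t ih =>
      obtain ⟨h1, h2, h3, h4⟩ := pvStep d f cur res res b h
      simp only [List.foldl_cons]
      have hA : maximumBookCopies_stepA (d, res) b
          = ((maximumBookCopies_stepB (d, f, cur, res) b).1,
             res ++ [(maximumBookCopies_stepB (d, f, cur, res) b).2.2.1]) := by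
        rw [← h1, ← h3]
      have hB : maximumBookCopies_stepB (d, f, cur, res) b
          = ((maximumBookCopies_stepB (d, f, cur, res) b).1,
             (maximumBookCopies_stepB (d, f, cur, res) b).2.1,
             (maximumBookCopies_stepB (d, f, cur, res) b).2.2.1,
             res ++ [(maximumBookCopies_stepB (d, f, cur, res) b).2.2.1]) := by
        rw [← h4]
      rw [hA]
      conv_rhs => rw [hB]
      exact ih _ _ _ _ (by rw [hB] at h2; exact h2)

lemma pvInvEmpty : pvInv PySem.Dict.empty PySem.Dict.empty 0 := by
  refine ⟨by simp, fun c => by simp [PySem.Dict.getD_empty], Or.inl rfl⟩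

-- ===== VERDICT (by name: the statement is the Claim_ definition above) =====
theorem maximumBookCopies_spec : Claim_equal_maximumBookCopies := by
  intro portalUpdate _
  show _ = _
  exact pvFoldl portalUpdate _ _ _ _ pvInvEmpty
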